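-- pv_equiv track=rewrite | github.com/nate-flasher/Project-Work | course/Freshman_Year/cos120/LABS/LAB12/L12.py | howManyHaveDupes
-- ===== SOURCE A (Python) =====
-- def howManyHaveDupes(aListOfLists):
--     newList=[]
--     count=0
--     for aList in aListOfLists:
--         newList=[]
--         for number in aList:
--             if number not in newList:
--                 newList.append(number)
--             else:
--                 count+=1
--                 break
--     return count
-- ===== SOURCE B (Python) =====
-- def howManyHaveDupes(aListOfLists):
--     return sum(1 for sub in aListOfLists if len(set(sub)) != len(sub))
-- ===== Notes on version B (the rewrite author's own statement) =====
-- stated objective: simpler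
-- what changed: Replaces the incremental scan-with-break over a growing seen-list by building the whole set once per sublist and comparing cardinalities, summed over a generator.
import Mathlib
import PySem

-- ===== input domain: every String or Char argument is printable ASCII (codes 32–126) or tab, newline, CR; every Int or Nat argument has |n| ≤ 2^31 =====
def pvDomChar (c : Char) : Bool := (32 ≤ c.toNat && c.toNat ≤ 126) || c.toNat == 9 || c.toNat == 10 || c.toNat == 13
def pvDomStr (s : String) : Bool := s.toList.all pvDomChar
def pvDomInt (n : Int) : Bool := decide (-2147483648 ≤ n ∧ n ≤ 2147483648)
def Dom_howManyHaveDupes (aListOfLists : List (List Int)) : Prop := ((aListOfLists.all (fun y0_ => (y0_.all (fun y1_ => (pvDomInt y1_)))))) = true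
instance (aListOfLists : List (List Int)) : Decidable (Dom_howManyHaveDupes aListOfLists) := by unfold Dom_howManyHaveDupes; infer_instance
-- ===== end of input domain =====

-- B counts duplicate-containing sublists by set-cardinality comparison instead of A's scan-and-break; objective: simpler.
-- ===== PORT A =====
-- inner 'for number in aList' loop of A: state = (newList, count), break = return count+1
def pvLoopA (l : List Int) (newList : List Int) (count : Int) : Int :=
  match l with
  | [] => count
  | x :: xs => if x ∈ newList then count + 1 else pvLoopA xs (newList ++ [x]) count

def howManyHaveDupes (aListOfLists : List (List Int)) : Int :=
  aListOfLists.foldl (fun count aList => pvLoopA aList [] count) 0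

-- ===== PORT B =====
def howManyHaveDupes_alt (aListOfLists : List (List Int)) : Int :=
  aListOfLists.foldl
    (fun count sub => if (PySem.Set.ofList sub).length ≠ sub.length then count + 1 else count) 0

-- ===== PRECONDITION & SPEC =====
def Spec_howManyHaveDupes (aListOfLists : List (List Int)) (out : Int) : Prop := out = howManyHaveDupes_alt aListOfLists
instance (aListOfLists : List (List Int)) (out : Int) : Decidable (Spec_howManyHaveDupes aListOfLists out) := by unfold Spec_howManyHaveDupes; infer_instance

-- ===== CLAIM (what is proved, stated in full; the proofs are below) =====
def Claim_equal_howManyHaveDupes : Prop := ∀ (aListOfLists : List (List Int)), Dom_howManyHaveDupes aListOfLists → Spec_howManyHaveDupes aListOfLists (howManyHaveDupes aListOfLists)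

-- ===== LEMMAS AND PROOFS =====

-- ===== VERDICT (by name: the statement is the Claim_ definition above) =====
-- foldl add over s produces s ++ t with t a sublist of the input
theorem pvFoldlAdd_sublist (l : List Int) : ∀ (s : List Int),
    ∃ t, l.foldl PySem.Set.add s = s ++ t ∧ t.Sublist l := by
  induction l with
  | nil => intro s; exact ⟨[], by simp⟩
  | cons x xs ih =>
    intro s
    by_cases h : x ∈ s
    · obtain ⟨t, ht, hs⟩ := ih s
      exact ⟨t, by simpa [List.foldl, PySem.Set.add, h] using ht, hs.cons x⟩
    · obtain ⟨t, ht, hs⟩ := ih (s ++ [x])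
      refine ⟨x :: t, ?_, hs.cons₂ x⟩
      simpa [List.foldl, PySem.Set.add, h] using ht

theorem pvSetLen_iff (l : List Int) :
    (PySem.Set.ofList l).length = l.length ↔ l.Nodup := by
  constructor
  · intro h
    obtain ⟨t, ht, hs⟩ := pvFoldlAdd_sublist l []
    have hol : PySem.Set.ofList l = t := by
      rw [PySem.Set.ofList_eq_foldl, ht]; simp
    have hn := PySem.Set.nodup_ofList (xs := l)
    have : t = l := hs.eq_of_length (by rw [← hol]; exact h)
    rw [← this]; rw [hol] at hn; exact hn
  · intro h; rw [PySem.Set.ofList_eq_self_of_nodup l h]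

theorem pvLoopA_eq (l : List Int) : ∀ (nl : List Int) (c : Int), nl.Nodup →
    pvLoopA l nl c = if (nl ++ l).Nodup then c else c + 1 := by
  induction l with
  | nil => intro nl c h; simp [pvLoopA, h]
  | cons x xs ih =>
    intro nl c h
    by_cases hx : x ∈ nl
    · have : ¬ (nl ++ x :: xs).Nodup := by
        intro hn
        exact (List.disjoint_of_nodup_append hn) hx (by simp)
      simp [pvLoopA, hx, this]
    · have h2 : (nl ++ [x]).Nodup := by
        simp only [List.nodup_append, h, List.nodup_cons]
        refine ⟨by simp, by simp, ?_⟩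
        intro a ha; simp; intro he; exact hx (he ▸ ha)
      have := ih (nl ++ [x]) c h2
      simp only [pvLoopA, hx, this]
      simp [List.append_assoc]

theorem howManyHaveDupes_spec : Claim_equal_howManyHaveDupes := by
  unfold Claim_equal_howManyHaveDupes
  intro l _
  unfold Spec_howManyHaveDupes howManyHaveDupes howManyHaveDupes_alt
  have hpt : ∀ (c : Int) (sub : List Int),
      pvLoopA sub [] c =
        (if (PySem.Set.ofList sub).length ≠ sub.length then c + 1 else c) := by
    intro c sub
    rw [pvLoopA_eq sub [] c List.nodup_nil]
    simp only [List.nil_append]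
    by_cases h : sub.Nodup
    · simp [h, (pvSetLen_iff sub).2 h]
    · have hne : (PySem.Set.ofList sub).length ≠ sub.length :=
        fun he => h ((pvSetLen_iff sub).1 he)
      simp [h, hne]
  simp only [hpt]
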